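-- pv_equiv track=rewrite | github.com/Mitulol/softsensor-assignment | archive/simulate_day.py | get_next_driver_index
-- ===== SOURCE A (Python) =====
-- def get_next_driver_index(existing_drivers):
--     nums = []
--     for d in existing_drivers:
--         if d["_id"].startswith("drv_"):
--             try:
--                 nums.append(int(d["_id"].split("_")[1]))
--             except:
--                 continue
--     return max(nums, default=5002) + 1
-- ===== SOURCE B (Python) =====
-- def _parse_index(_id):
--     """Value of int(_id.split('_')[1]), or None where that would raise."""
--     try:
--         return int(_id.split("_")[1])
--     except (ValueError, IndexError):
--         return None
--
--
-- def get_next_driver_index(existing_drivers):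
--     nums = [n for n in (_parse_index(d["_id"]) for d in existing_drivers
--                         if d["_id"].startswith("drv_")) if n is not None]
--     ranked = sorted(nums, reverse=True)
--     return (ranked[0] if ranked else 5002) + 1
-- ===== Notes on version B (the rewrite author's own statement) =====
-- stated objective: alternative
-- what changed: B replaces A's explicit append-loop-then-max(default=5002) reduction with comprehensions that collect the parsed indices and a sort-descending-then-take-the-head selection (conditional default on the empty list), trading the max reduction for a sort-based one.
import Mathlib
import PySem

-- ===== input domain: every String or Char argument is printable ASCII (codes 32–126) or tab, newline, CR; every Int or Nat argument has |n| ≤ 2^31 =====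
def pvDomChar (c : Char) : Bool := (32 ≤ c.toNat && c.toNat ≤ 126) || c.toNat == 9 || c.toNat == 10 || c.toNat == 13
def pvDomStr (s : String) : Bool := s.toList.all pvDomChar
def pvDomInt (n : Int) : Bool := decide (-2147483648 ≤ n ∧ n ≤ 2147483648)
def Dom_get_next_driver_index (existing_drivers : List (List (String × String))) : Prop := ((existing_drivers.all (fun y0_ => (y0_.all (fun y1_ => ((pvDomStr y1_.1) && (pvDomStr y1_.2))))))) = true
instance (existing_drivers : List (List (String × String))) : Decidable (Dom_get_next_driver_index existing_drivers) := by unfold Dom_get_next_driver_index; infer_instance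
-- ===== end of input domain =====

-- B replaces A's max-reduction over the accumulated indices by sort-descending-and-take-the-head
-- (comprehensions + sorted instead of loop + max); objective: alternative, same exact result.

-- ===== PORT A =====
-- int(d["_id"].split("_")[1]) may raise ValueError/IndexError, both caught by the bare except:
-- ported as pyGet? followed by ofStr?, 'none' = skip.  d["_id"] raises KeyError on a dict
-- without the key; Pre_ excludes that, the port reads "" there.
def get_next_driver_index (existing_drivers : List (List (String × String))) : Int :=
  let nums : List Int := existing_drivers.foldl (fun nums d =>
    let id := (List.lookup "_id" d).getD ""
    if PySem.Str.startswith id "drv_" then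
      match (PySem.List.pyGet? ((PySem.Str.split? id "_").getD []) 1).bind PySem.Int.ofStr? with
      | some n => nums ++ [n]
      | none => nums
    else nums) []
  PySem.List.maxD nums (fun x => x) 5002 + 1

-- ===== PORT B =====
-- _parse_index of Source B; the 'except (ValueError, IndexError)' is the 'none' of pyGet?/ofStr?
def pvParseIndex (s : String) : Option Int :=
  (PySem.List.pyGet? ((PySem.Str.split? s "_").getD []) 1).bind PySem.Int.ofStr?

def get_next_driver_index_alt (existing_drivers : List (List (String × String))) : Int :=
  let nums : List Int :=
    ((existing_drivers.filter (fun d =>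
        PySem.Str.startswith ((List.lookup "_id" d).getD "") "drv_")).map
      (fun d => pvParseIndex ((List.lookup "_id" d).getD ""))).filterMap id
  let ranked := PySem.List.sorted nums (fun x => x) true
  (match ranked with | [] => 5002 | m :: _ => m) + 1

-- ===== PRECONDITION & SPEC =====
-- Pre_ excludes exactly the dicts missing the key "_id", where Python's d["_id"] raises KeyError.
def Pre_get_next_driver_index (existing_drivers : List (List (String × String))) : Prop :=
  (existing_drivers.all (fun d => d.any (fun p => p.1 == "_id"))) = true
instance (existing_drivers : List (List (String × String))) : Decidable (Pre_get_next_driver_index existing_drivers) := by unfold Pre_get_next_driver_index; infer_instance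
def pvWitness_get_next_driver_index : (List (List (String × String))) := [[("_id", "drv_7")], [("_id", "x")]]
def Spec_get_next_driver_index (existing_drivers : List (List (String × String))) (out : Int) : Prop := out = get_next_driver_index_alt existing_drivers
instance (existing_drivers : List (List (String × String))) (out : Int) : Decidable (Spec_get_next_driver_index existing_drivers out) := by unfold Spec_get_next_driver_index; infer_instance

-- ===== CLAIM =====
def Claim_equal_get_next_driver_index : Prop := ∀ (existing_drivers : List (List (String × String))), Dom_get_next_driver_index existing_drivers → Pre_get_next_driver_index existing_drivers → Spec_get_next_driver_index existing_drivers (get_next_driver_index existing_drivers)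

-- ===== LEMMAS AND PROOFS =====

-- A's accumulating loop builds exactly B's filter-map-filterMap chain (prefixed by any accumulator).
theorem pv_nums_eq (ds : List (List (String × String))) (acc : List Int) :
    ds.foldl (fun nums d =>
      let id := (List.lookup "_id" d).getD ""
      if PySem.Str.startswith id "drv_" then
        match (PySem.List.pyGet? ((PySem.Str.split? id "_").getD []) 1).bind PySem.Int.ofStr? with
        | some n => nums ++ [n]
        | none => nums
      else nums) acc
    = acc ++ ((ds.filter (fun d =>
        PySem.Str.startswith ((List.lookup "_id" d).getD "") "drv_")).map
          (fun d => pvParseIndex ((List.lookup "_id" d).getD ""))).filterMap id := by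
  induction ds generalizing acc with
  | nil => simp
  | cons d ds ih =>
    by_cases hs : PySem.Str.startswith ((List.lookup "_id" d).getD "") "drv_" = true
    · cases hp : (PySem.List.pyGet? ((PySem.Str.split? ((List.lookup "_id" d).getD "") "_").getD []) 1).bind PySem.Int.ofStr? with
      | none =>
        simp only [List.foldl_cons, List.filter_cons, hs, if_true, List.map_cons,
          List.filterMap_cons, pvParseIndex, hp, id_eq]
        exact ih acc
      | some n =>
        simp only [List.foldl_cons, List.filter_cons, hs, if_true, List.map_cons,
          List.filterMap_cons, pvParseIndex, hp, id_eq]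
        rw [ih (acc ++ [n])]
        simp [pvParseIndex]
    · simp only [List.foldl_cons, List.filter_cons, if_neg hs]
      exact ih acc

-- max(xs, default=5002) = head of the descending sort of xs (5002 on empty).
theorem pv_maxD_eq_head_sorted (xs : List Int) :
    PySem.List.maxD xs (fun x => x) 5002
      = (match PySem.List.sorted xs (fun x => x) true with | [] => 5002 | m :: _ => (m : Int)) := by
  cases hsrt : PySem.List.sorted xs (fun x => x) true with
  | nil =>
    have hx : xs = [] := (PySem.List.sorted_eq_nil_iff xs (fun x => x) true).mp hsrt
    subst hx; rfl
  | cons m t =>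
    have hxne : xs ≠ [] := by
      intro h
      rw [h, (PySem.List.sorted_eq_nil_iff [] (fun x : Int => x) true).mpr rfl] at hsrt
      cases hsrt
    cases hmax : PySem.List.max? xs (fun x : Int => x) with
    | none =>
      exact absurd ((PySem.List.max?_eq_none_iff xs (fun x : Int => x)).mp hmax) hxne
    | some M =>
      have hM_mem : M ∈ xs := PySem.List.max?_mem hmax
      have hm_mem : m ∈ xs := (PySem.List.mem_sorted xs (fun x => x) true m).mp (by rw [hsrt]; exact List.mem_cons_self ..)
      have h1 : M ≤ m := PySem.List.key_head_sorted_rev_ge xs (fun x => x) hsrt M hM_mem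
      have h2 : m ≤ M := PySem.List.max?_isMax hmax m hm_mem
      simp only [PySem.List.maxD, hmax, Option.getD_some]
      omega

-- ===== VERDICT =====
theorem get_next_driver_index_spec : Claim_equal_get_next_driver_index := by
  intro ds _ _
  unfold Spec_get_next_driver_index get_next_driver_index get_next_driver_index_alt
  simp only [pv_nums_eq ds [], List.nil_append, pv_maxD_eq_head_sorted]
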